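-- pv_equiv track=rewrite | github.com/Udaydsmls/Three_Player_Hexagonal_Othello | HexBoard.py | generate_generalized_matrix
-- ===== SOURCE A (Python) =====
-- def generate_generalized_matrix(n: int, h: int, m0: int) -> list[list[str]]:
--     """
--     Generates a 2D matrix representation of a hexagonal board with customizable dimensions and margins.
--
--     Parameters:
--         n (int): The base width of the hexagonal board.
--         h (int): The height of the hexagonal board.
--         m0 (int): The margin width around the hexagonal board.
--
--     Returns:
--         list[list[str]]: A 2D list representing the hexagonal board, where 'X ' represents the margin and ' ' represents the empty spaces within the board.
--     """
--
--     width = n + 2 * m0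
--     matrix = []
--
--     for i in range(h):
--         delta = min(i, h - 1 - i)
--         margin = max(m0 - delta, 0)
--         block_len = width - 2 * margin
--         block = ["  " for _ in range(block_len)]
--         row = ["X "] * margin + block + ["X "] * margin
--         matrix.append(row)
--
--     return matrix
-- ===== SOURCE B (Python) =====
-- def generate_generalized_matrix(n: int, h: int, m0: int) -> list[list[str]]:
--     # Mirror-symmetric build: compute only the top half, then reflect copies of it.
--     width = n + 2 * m0
--     mid = (h + 1) // 2
--     top = []
--     for i in range(mid):
--         margin = max(m0 - i, 0)
--         top.append(["X "] * margin + ["  "] * (width - 2 * margin) + ["X "] * margin)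
--     return top + [row.copy() for row in reversed(top[:h - mid])]
-- ===== Notes on version B (the rewrite author's own statement) =====
-- stated objective: alternative
-- what changed: B exploits the board's top-bottom mirror symmetry: it computes only the first (h+1)//2 rows (where delta = i, so no min is needed) and produces the bottom half as reversed copies of the top half, instead of recomputing min/max margins for every row.
import Mathlib
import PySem

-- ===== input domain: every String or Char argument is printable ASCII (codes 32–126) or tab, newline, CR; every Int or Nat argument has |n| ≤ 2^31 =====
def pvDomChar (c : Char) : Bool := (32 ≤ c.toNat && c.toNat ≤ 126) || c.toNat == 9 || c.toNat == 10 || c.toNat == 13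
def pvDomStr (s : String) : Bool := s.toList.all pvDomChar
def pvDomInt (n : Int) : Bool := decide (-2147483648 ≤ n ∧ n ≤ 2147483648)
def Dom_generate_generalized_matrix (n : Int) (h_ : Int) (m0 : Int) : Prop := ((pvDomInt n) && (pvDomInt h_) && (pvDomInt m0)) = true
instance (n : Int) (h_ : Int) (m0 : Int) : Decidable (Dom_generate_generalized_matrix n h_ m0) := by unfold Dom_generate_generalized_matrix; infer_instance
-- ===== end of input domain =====

-- B builds only the top half of the board (where delta = i) and mirrors copies of it
-- for the bottom half, instead of recomputing min/max margins for every row ('alternative').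

-- ===== PORT A =====
-- one loop body of A: delta = min(i, h-1-i); margin = max(m0-delta, 0); row built from it
def pvRowA (n : Int) (h_ : Int) (m0 : Int) (i : Int) : List String :=
  let width := n + 2 * m0
  let delta := min i (h_ - 1 - i)
  let margin := max (m0 - delta) 0
  let block_len := width - 2 * margin
  let block := (PySem.List.pyRange 0 block_len 1).map (fun _ => "  ")
  PySem.List.pyRepeat ["X "] margin ++ block ++ PySem.List.pyRepeat ["X "] margin

def generate_generalized_matrix (n : Int) (h_ : Int) (m0 : Int) : List (List String) :=
  (PySem.List.pyRange 0 h_ 1).foldl (fun matrix i => matrix ++ [pvRowA n h_ m0 i]) []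

-- ===== PORT B =====
-- one loop body of B: only used for the top half, margin = max(m0 - i, 0) directly
def pvRowB (n : Int) (m0 : Int) (i : Int) : List String :=
  let width := n + 2 * m0
  let margin := max (m0 - i) 0
  PySem.List.pyRepeat ["X "] margin ++ PySem.List.pyRepeat ["  "] (width - 2 * margin)
    ++ PySem.List.pyRepeat ["X "] margin

def generate_generalized_matrix_alt (n : Int) (h_ : Int) (m0 : Int) : List (List String) :=
  let mid := PySem.Int.floordiv (h_ + 1) 2
  let top := (PySem.List.pyRange 0 mid 1).foldl (fun acc i => acc ++ [pvRowB n m0 i]) []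
  -- 'row.copy()' is the identity on immutable Lean lists, so the comprehension is a reverse
  top ++ (PySem.List.slice top none (some (h_ - mid))).reverse

-- ===== PRECONDITION & SPEC =====
def Spec_generate_generalized_matrix (n : Int) (h_ : Int) (m0 : Int) (out : List (List String)) : Prop := out = generate_generalized_matrix_alt n h_ m0
instance (n : Int) (h_ : Int) (m0 : Int) (out : List (List String)) : Decidable (Spec_generate_generalized_matrix n h_ m0 out) := by unfold Spec_generate_generalized_matrix; infer_instance

-- ===== CLAIM (what is proved, stated in full; the proofs are below) =====
def Claim_equal_generate_generalized_matrix : Prop := ∀ (n : Int) (h_ : Int) (m0 : Int), Dom_generate_generalized_matrix n h_ m0 → Spec_generate_generalized_matrix n h_ m0 (generate_generalized_matrix n h_ m0)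

-- ===== LEMMAS AND PROOFS =====

-- on the top half (2i ≤ h-1) the min resolves to i, and A's comprehension block is B's replicate
theorem pvRow_eq (n h_ m0 i : Int) (hi : 2 * i ≤ h_ - 1) :
    pvRowA n h_ m0 i = pvRowB n m0 i := by
  have hmin : min i (h_ - 1 - i) = i := by omega
  simp [pvRowA, pvRowB, hmin, PySem.List.pyRepeat_singleton, List.map_const']

-- the row of A is symmetric under i ↦ h-1-i
theorem pvRowA_symm (n h_ m0 i : Int) :
    pvRowA n h_ m0 (h_ - 1 - i) = pvRowA n h_ m0 i := by
  have hmm : min (h_ - 1 - i) i = min i (h_ - 1 - i) := min_comm _ _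
  simp [pvRowA, hmm]

-- ===== VERDICT (by name: the statement is the Claim_ definition above) =====
theorem generate_generalized_matrix_spec : Claim_equal_generate_generalized_matrix := by
  intro n h_ m0 _
  unfold Spec_generate_generalized_matrix generate_generalized_matrix generate_generalized_matrix_alt
  dsimp only
  rw [PySem.List.foldl_append_singleton_eq_map, PySem.List.foldl_append_singleton_eq_map]
  simp only [List.nil_append]
  set mid := PySem.Int.floordiv (h_ + 1) 2 with hmid
  by_cases hpos : 1 ≤ h_
  · have hediv : mid = (h_ + 1) / 2 := by
      rw [hmid, PySem.Int.floordiv_eq_ediv_of_pos (by omega)]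
    have hb1 : h_ ≤ 2 * mid := by omega
    have hb2 : 2 * mid ≤ h_ + 1 := by omega
    have hsl : PySem.List.slice ((PySem.List.pyRange 0 mid 1).map (pvRowB n m0)) none
        (some (h_ - mid)) = ((PySem.List.pyRange 0 mid 1).map (pvRowB n m0)).take (h_ - mid).toNat := by
      rw [show h_ - mid = (((h_ - mid).toNat : Nat) : Int) by omega, PySem.List.slice_to_natCast]
      simp
      omega
    rw [hsl]
    rw [PySem.List.pyRange_one 0 h_, PySem.List.pyRange_one 0 mid]
    simp only [Int.sub_zero, zero_add] at *
    apply List.ext_getElem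
    · simp; omega
    · intro k hk1 hk2
      simp only [List.length_map, List.length_range] at hk1
      have hkH : k < h_.toNat := hk1
      by_cases hkt : k < mid.toNat
      · rw [List.getElem_append_left (by simp; omega)]
        simp only [List.map_map, Function.comp, List.getElem_map, List.getElem_range]
        exact pvRow_eq n h_ m0 k (by omega)
      · rw [List.getElem_append_right (by simp; omega)]
        simp only [List.map_map, Function.comp, List.getElem_reverse, List.getElem_take,
          List.getElem_map, List.getElem_range, List.length_take,
          List.length_map, List.length_range]
        rw [show ((min (h_ - mid).toNat mid.toNat - 1 - (k - mid.toNat) : Nat) : Int) =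
              h_ - 1 - (k : Int) from by omega,
            ← pvRow_eq n h_ m0 (h_ - 1 - (k : Int)) (by omega), pvRowA_symm]
  · -- h_ ≤ 0 : everything is empty
    have hm : mid ≤ 0 := by
      have : mid = (h_ + 1) / 2 := by
        rw [hmid, PySem.Int.floordiv_eq_ediv_of_pos (by omega)]
      omega
    rw [PySem.List.pyRange_one_eq_nil (by omega), PySem.List.pyRange_one_eq_nil (by omega)]
    simp [PySem.List.slice]
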